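-- pv_equiv track=rewrite | github.com/douxlit/HydroTrendsFrance | BNPE.py | extract_ouvrages
-- ===== SOURCE A (Python) =====
-- def get_code_ouvrage(obj):
--     return obj['properties']['code_ouvrage']
--
-- def extract_ouvrages(features : list, vlim = 200) -> list :
--
--     """
--     Extract a list of id for the installations describe in the 'features' list extracted from a request to https://hubeau.eaufrance.fr/api/v1/prelevements/
--     Return a list with lists of installation id of size = vlim.
--
--     features : 'features' attribute from dict coming from request to api
--     vlim : size of the lists within the final list. by default = max size = 200
--     """
--
--     ouv_final = []
--     ouv_extracted = []
--
--     for ouv in features :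
--         code_ouv = get_code_ouvrage(ouv)
--         n = len(ouv_extracted)
--         if ouv == features[-1] :
--             ouv_extracted.append(code_ouv)
--             ouv_final.append(ouv_extracted)
--             return ouv_final
--         elif n < vlim :
--             ouv_extracted.append(code_ouv)
--         else :
--             ouv_final.append(ouv_extracted)
--             ouv_extracted = [code_ouv]
-- ===== SOURCE B (Python) =====
-- def get_code_ouvrage(obj):
--     return obj['properties']['code_ouvrage']
--
-- def extract_ouvrages(features : list, vlim = 200) -> list :
--     """Split the ouvrage codes of the features into groups of vlim, the code of
--     the final feature being appended to the last group."""
--     codes = [get_code_ouvrage(f) for f in features]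
--     head = codes[:-1]
--     chunks = [head[i:i + vlim] for i in range(0, len(head), vlim)] or [[]]
--     chunks[-1].append(codes[-1])
--     return chunks
-- ===== Notes on version B (the rewrite author's own statement) =====
-- stated objective: simpler
-- what changed: A's single interleaved accumulate-and-flush loop with in-loop terminal detection and early return is replaced by a map-then-slice decomposition: map every feature to its code, slice the head codes[:-1] into fixed groups head[i:i+vlim], and append the terminal code to the last group; …
-- intended difference: When a feature before the last one equals the last feature, A's in-loop 'ouv == features[-1]' test fires early and A returns only the codes up to that first duplicate, silently dropping the remaining installations; B returns the codes of all features, which is what the extraction is for. — e.g. on extract_ouvrages([[("properties", [("code_ouvrage", "a")])], [("properties", [("code_ouvrage", "a")])]], 2): A returns [["a"]], B returns [["a", "a"]]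
-- outside the precondition, e.g. on extract_ouvrages([], 5): A returns None, B raises IndexError
import Mathlib
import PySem

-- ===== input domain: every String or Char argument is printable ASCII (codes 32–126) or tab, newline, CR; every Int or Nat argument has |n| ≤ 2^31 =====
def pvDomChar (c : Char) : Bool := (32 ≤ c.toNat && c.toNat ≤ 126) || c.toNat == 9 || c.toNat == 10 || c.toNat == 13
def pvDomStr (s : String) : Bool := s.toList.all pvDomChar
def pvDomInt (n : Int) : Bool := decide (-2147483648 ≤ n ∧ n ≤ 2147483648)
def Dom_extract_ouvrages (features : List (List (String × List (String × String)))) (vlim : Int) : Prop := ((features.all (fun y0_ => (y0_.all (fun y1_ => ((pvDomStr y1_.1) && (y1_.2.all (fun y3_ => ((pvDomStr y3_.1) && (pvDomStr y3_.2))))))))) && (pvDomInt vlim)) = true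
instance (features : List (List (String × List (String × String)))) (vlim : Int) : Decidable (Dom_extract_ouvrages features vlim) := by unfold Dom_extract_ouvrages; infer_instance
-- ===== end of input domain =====

-- B replaces A's accumulate-and-flush loop with in-loop terminal detection by a map-then-slice
-- decomposition (simpler); return value only; outside D_ (a duplicate of the last feature) they agree.

-- ===== PORT A =====
-- get_code_ouvrage: obj['properties']['code_ouvrage']; returns "" where Python raises KeyError (such inputs are excluded by Pre_)
def pvCode (obj : List (String × List (String × String))) : String :=
  ((PySem.Dict.mk ((PySem.Dict.get? (PySem.Dict.mk obj) "properties").getD [])).get? "code_ouvrage").getD ""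

-- Python's order-insensitive dict equality for dict[str, str] (exact for unique-key assoc lists, which Pre_ requires)
def pvDictEq (a b : List (String × String)) : Bool :=
  (a.all (fun kv => (PySem.Dict.mk b).get? kv.1 == some kv.2)) &&
  (b.all (fun kv => (PySem.Dict.mk a).get? kv.1 == some kv.2))

-- Python's '==' on two feature dicts dict[str, dict[str, str]]
def pvFeatEq (a b : List (String × List (String × String))) : Bool :=
  (a.all (fun kv => match (PySem.Dict.mk b).get? kv.1 with
      | some w => pvDictEq kv.2 w
      | none => false)) &&
  (b.all (fun kv => match (PySem.Dict.mk a).get? kv.1 with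
      | some w => pvDictEq kv.2 w
      | none => false))

-- the for-loop of A, state = (ouv_final, ouv_extracted); falling off the list is Python's 'return None' ([] here; excluded by Pre_)
def pvLoopA (vlim : Int) (last : List (String × List (String × String))) :
    List (List (String × List (String × String))) → List (List String) → List String → List (List String)
  | [], _final, _ext => []
  | ouv :: rest, final, ext =>
      let code := pvCode ouv
      if pvFeatEq ouv last then final ++ [ext ++ [code]]
      else if (ext.length : Int) < vlim then pvLoopA vlim last rest final (ext ++ [code])
      else pvLoopA vlim last rest (final ++ [ext]) [code]

def extract_ouvrages (features : List (List (String × List (String × String)))) (vlim : Int) : List (List String) :=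
  match PySem.List.pyGet? features (-1) with
  | none => []          -- features = []: the loop never runs and Python A returns None (excluded by Pre_)
  | some last => pvLoopA vlim last features [] []

-- ===== PORT B =====
-- 'chunks or [[]]' followed by 'chunks[-1].append(c)'
def pvAppendLast (chunks : List (List String)) (c : String) : List (List String) :=
  match chunks.getLast? with
  | none => [[c]]
  | some lc => chunks.dropLast ++ [lc ++ [c]]

-- codes = [get_code_ouvrage(f) for f in features]; head = codes[:-1];
-- chunks = [head[i:i+vlim] for i in range(0, len(head), vlim)] or [[]]; chunks[-1].append(codes[-1])
def extract_ouvrages_alt (features : List (List (String × List (String × String)))) (vlim : Int) : List (List String) :=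
  let codes := features.map pvCode
  match PySem.List.pyGet? codes (-1) with
  | none => []          -- codes[-1] on the empty list: IndexError (excluded by Pre_)
  | some lastc =>
      let head := PySem.List.slice codes none (some (-1))
      let chunks := (PySem.List.pyRange 0 (head.length : Int) vlim).map
          (fun i => PySem.List.slice head (some i) (some (i + vlim)))
      pvAppendLast chunks lastc

-- ===== PRECONDITION & SPEC =====
def pvHasCode (f : List (String × List (String × String))) : Bool :=
  ((PySem.Dict.get? (PySem.Dict.mk f) "properties").bind
    (fun d => PySem.Dict.get? (PySem.Dict.mk d) "code_ouvrage")).isSome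

def pvNodupKeys (f : List (String × List (String × String))) : Bool :=
  decide ((f.map Prod.fst).Nodup) && f.all (fun kv => decide ((kv.2.map Prod.fst).Nodup))

-- Pre_ excludes: empty features (A returns None, not a list of lists); vlim < 1 (B's range step raises
-- ValueError at 0, and for negative vlim A's always-flush accumulation is accidental); features lacking
-- the 'properties'/'code_ouvrage' keys (both programs normally raise KeyError there, though A returns
-- when a duplicate of the terminal feature stops it before the malformed one); and association lists
-- with duplicate keys, which cannot arise from a Python dict.
def Pre_extract_ouvrages (features : List (List (String × List (String × String)))) (vlim : Int) : Prop :=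
  features ≠ [] ∧ 1 ≤ vlim ∧ ∀ f ∈ features, pvHasCode f = true ∧ pvNodupKeys f = true

instance (features : List (List (String × List (String × String)))) (vlim : Int) : Decidable (Pre_extract_ouvrages features vlim) := by unfold Pre_extract_ouvrages; infer_instance

def pvWitness_extract_ouvrages : (List (List (String × List (String × String)))) × Int :=
  ([[("properties", [("code_ouvrage", "a")])],
    [("properties", [("code_ouvrage", "b")])],
    [("properties", [("code_ouvrage", "c")])]], 2)

-- When a feature before the last one equals the last feature, A's in-loop 'ouv == features[-1]' test
-- fires early and A returns only the codes up to that first duplicate, silently dropping the remaining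
-- installations; B returns the codes of all features, which is what the extraction is for.
def D_extract_ouvrages (features : List (List (String × List (String × String)))) (vlim : Int) : Prop :=
  features.dropLast.any (fun x => pvFeatEq x (features.getLastD [])) = true

instance (features : List (List (String × List (String × String)))) (vlim : Int) : Decidable (D_extract_ouvrages features vlim) := by unfold D_extract_ouvrages; infer_instance

def Spec_extract_ouvrages (features : List (List (String × List (String × String)))) (vlim : Int) (out : List (List String)) : Prop := ¬ D_extract_ouvrages features vlim → out = extract_ouvrages_alt features vlim
instance (features : List (List (String × List (String × String)))) (vlim : Int) (out : List (List String)) : Decidable (Spec_extract_ouvrages features vlim out) := by unfold Spec_extract_ouvrages; infer_instance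

def pvDiffWitness_extract_ouvrages : (List (List (String × List (String × String)))) × Int :=
  ([[("properties", [("code_ouvrage", "a")])],
    [("properties", [("code_ouvrage", "a")])]], 2)

def pvDiffWitnessOut_extract_ouvrages : (List (List String)) × (List (List String)) :=
  ([["a"]], [["a", "a"]])

-- ===== CLAIM (what is proved, stated in full; the proofs are below) =====
def Claim_unchanged_extract_ouvrages : Prop := ∀ (features : List (List (String × List (String × String)))) (vlim : Int), Dom_extract_ouvrages features vlim → Pre_extract_ouvrages features vlim → Spec_extract_ouvrages features vlim (extract_ouvrages features vlim)
def Claim_changed_extract_ouvrages : Prop := Dom_extract_ouvrages (pvDiffWitness_extract_ouvrages.1) (pvDiffWitness_extract_ouvrages.2) ∧ Pre_extract_ouvrages (pvDiffWitness_extract_ouvrages.1) (pvDiffWitness_extract_ouvrages.2) ∧ D_extract_ouvrages (pvDiffWitness_extract_ouvrages.1) (pvDiffWitness_extract_ouvrages.2) ∧ extract_ouvrages (pvDiffWitness_extract_ouvrages.1) (pvDiffWitness_extract_ouvrages.2) = pvDiffWitnessOut_extract_ouvrages.1 ∧ extract_ouvrages_alt (pvDiffWitness_extract_ouvrages.1)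 (pvDiffWitness_extract_ouvrages.2) = pvDiffWitnessOut_extract_ouvrages.2 ∧ pvDiffWitnessOut_extract_ouvrages.1 ≠ pvDiffWitnessOut_extract_ouvrages.2
def Claim_exact_extract_ouvrages : Prop := ∀ (features : List (List (String × List (String × String)))) (vlim : Int), Dom_extract_ouvrages features vlim → Pre_extract_ouvrages features vlim → D_extract_ouvrages features vlim → extract_ouvrages features vlim ≠ extract_ouvrages_alt features vlim

-- ===== LEMMAS AND PROOFS =====

-- A's loop restricted to codes (state (final, ext)), once the element equal to the terminal is in front
def pvChunkC (vlim : Int) (c : String) : List (List String) → List String → List String → List (List String)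
  | final, ext, [] => final ++ [ext ++ [c]]
  | final, ext, code :: rest =>
      if (ext.length : Int) < vlim then pvChunkC vlim c final (ext ++ [code]) rest
      else pvChunkC vlim c (final ++ [ext]) [code] rest

-- fixed-size chunking, chunk size v+1

def pvChunksOf (v : Nat) : List String → List (List String)
  | [] => []
  | c :: cs => (c :: cs.take v) :: pvChunksOf v (cs.drop v)
  termination_by l => l.length
  decreasing_by simp

def pvMergeLast (chunks : List (List String)) (c : String) : List (List String) :=
  match chunks.getLast? with
  | none => [[c]]
  | some lc => chunks.dropLast ++ [lc ++ [c]]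

theorem pvChunksOf_nil (v : Nat) : pvChunksOf v [] = [] := by
  rw [pvChunksOf]

theorem pvChunksOf_cons (v : Nat) (x : String) (cs : List String) :
    pvChunksOf v (x :: cs) = (x :: cs.take v) :: pvChunksOf v (cs.drop v) := by
  rw [pvChunksOf]

theorem pvChunkC_consume (vlim : Int) (c : String) (xs : List String) :
    ∀ (ext rest : List String) (final : List (List String)),
    (ext.length + xs.length : Int) ≤ vlim →
    pvChunkC vlim c final ext (xs ++ rest) = pvChunkC vlim c final (ext ++ xs) rest := by
  induction xs with
  | nil => simp
  | cons x xs ih =>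
      intro ext rest final h
      simp only [List.length_cons] at h
      have hlt : (ext.length : Int) < vlim := by push_cast at h ⊢; omega
      simp only [List.cons_append, pvChunkC, hlt, if_pos]
      rw [ih (ext ++ [x]) rest final (by simp; push_cast at h ⊢; omega)]
      simp

theorem pvMergeLast_cons (hd : List String) (tl : List (List String)) (c : String) (h : tl ≠ []) :
    pvMergeLast (hd :: tl) c = hd :: pvMergeLast tl c := by
  cases tl with
  | nil => exact absurd rfl h
  | cons a l =>
      unfold pvMergeLast
      rw [List.getLast?_cons_cons]
      cases htl : (a :: l).getLast? with
      | none => exact absurd (List.getLast?_eq_none_iff.mp htl) (by simp)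
      | some lc =>
          rw [List.dropLast_cons_of_ne_nil (by simp : (a :: l) ≠ [])]
          simp

theorem pvChunkC_eq_merge (vlim : Int) (hv : 1 ≤ vlim) (c : String) :
    ∀ (codes : List String) (final : List (List String)),
    pvChunkC vlim c final [] codes = final ++ pvMergeLast (pvChunksOf (vlim.toNat - 1) codes) c := by
  intro codes
  induction codes using pvChunksOf.induct (v := vlim.toNat - 1) with
  | case1 => intro final; simp [pvChunkC, pvChunksOf_nil, pvMergeLast]
  | case2 x cs ih =>
      intro final
      have hvt : vlim.toNat - 1 + 1 = vlim.toNat := by omega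
      have hfull : (x :: cs) = (x :: cs.take (vlim.toNat - 1)) ++ cs.drop (vlim.toNat - 1) := by
        simp
      have hle : (([] : List String).length + (x :: cs.take (vlim.toNat - 1)).length : Int) ≤ vlim := by
        simp [List.length_take]
        omega
      rw [pvChunksOf_cons]
      conv_lhs => rw [hfull]
      rw [pvChunkC_consume vlim c _ _ _ _ hle]
      cases hdrop : cs.drop (vlim.toNat - 1) with
      | nil => simp [pvChunkC, pvChunksOf_nil, pvMergeLast]
      | cons y ys =>
          rw [hdrop] at ih
          have hlen : cs.length > vlim.toNat - 1 := by
            by_contra hcon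
            simp [List.drop_eq_nil_of_le (by omega : cs.length ≤ vlim.toNat - 1)] at hdrop
          have hfl : ((x :: cs.take (vlim.toNat - 1)).length : Int) = vlim := by
            simp [List.length_take]
            omega
          have step1 : pvChunkC vlim c final ([] ++ (x :: cs.take (vlim.toNat - 1))) (y :: ys)
              = pvChunkC vlim c (final ++ [x :: cs.take (vlim.toNat - 1)]) [y] ys := by
            simp only [List.nil_append, pvChunkC, hfl]
            rw [if_neg (by omega)]
          have step2 : pvChunkC vlim c (final ++ [x :: cs.take (vlim.toNat - 1)]) [] (y :: ys)
              = pvChunkC vlim c (final ++ [x :: cs.take (vlim.toNat - 1)]) [y] ys := by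
            simp only [pvChunkC, List.length_nil]
            rw [if_pos (by omega)]
            simp
          rw [step1, ← step2, ih (final ++ [x :: cs.take (vlim.toNat - 1)])]
          have hne : pvChunksOf (vlim.toNat - 1) (y :: ys) ≠ [] := by
            rw [pvChunksOf_cons]; simp
          rw [pvMergeLast_cons _ _ _ hne]
          simp

theorem pyRange_pos_nil (a v : Int) (ha : a ≤ 0) (hv : 0 < v) :
    PySem.List.pyRange 0 a v = [] := by
  rw [PySem.List.pyRange_of_pos _ _ hv]
  rw [if_neg (by omega)]
  simp

theorem pyRange_pos_cons (n v : Int) (h0 : 0 < n) (hv : 0 < v) :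
    PySem.List.pyRange 0 n v = 0 :: (PySem.List.pyRange 0 (n - v) v).map (· + v) := by
  rw [PySem.List.pyRange_of_pos _ _ hv, PySem.List.pyRange_of_pos _ _ hv]
  rw [if_pos (by omega)]
  have key : n - 0 + v - 1 = (n - 1) + 1 * v := by ring
  rw [key, Int.add_mul_ediv_right _ _ (by omega)]
  by_cases hc : n - v ≤ 0
  · rw [if_neg (by omega)]
    have h1 : (n - 1) / v = 0 := Int.ediv_eq_zero_of_lt (by omega) (by omega)
    rw [h1]
    simp
  · rw [if_pos (by omega)]
    have key2 : n - v - 0 + v - 1 = (n - v - 1) + 1 * v := by ring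
    rw [key2, Int.add_mul_ediv_right _ _ (by omega)]
    have h2 : n - 1 = (n - v - 1) + 1 * v := by ring
    rw [h2, Int.add_mul_ediv_right _ _ (by omega)]
    have hM : 0 ≤ (n - v - 1) / v := Int.ediv_nonneg (by omega) (by omega)
    have ht : ((n - v - 1) / v + 1 + 1).toNat = ((n - v - 1) / v + 1).toNat + 1 := by omega
    rw [ht, List.range_succ_eq_map, List.map_cons]
    simp only [List.map_map]
    refine List.cons_eq_cons.mpr ⟨by simp, ?_⟩
    apply List.map_congr_left
    intro k _
    simp [Function.comp]
    ring

theorem chunks_eq_chunksOf (vlim : Int) (hv : 1 ≤ vlim) :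
    ∀ (codes : List String),
    (PySem.List.pyRange 0 (codes.length : Int) vlim).map
        (fun i => PySem.List.slice codes (some i) (some (i + vlim)))
      = pvChunksOf (vlim.toNat - 1) codes := by
  intro codes
  induction codes using pvChunksOf.induct (v := vlim.toNat - 1) with
  | case1 => simp [pyRange_pos_nil 0 vlim (by omega) (by omega), pvChunksOf_nil]
  | case2 x cs ih =>
      have hvt : vlim.toNat - 1 + 1 = vlim.toNat := by omega
      rw [pyRange_pos_cons _ _ (by simp) (by omega)]
      rw [List.map_cons, List.map_map, pvChunksOf_cons]
      congr 1
      · -- head chunk: codes[0 : vlim]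
        have hh : PySem.List.slice (x :: cs) (some 0) (some (0 + vlim))
            = List.take vlim.toNat (x :: cs) := by
          rw [PySem.List.slice_toNat _ (by omega) (by omega)]
          simp
        rw [hh, ← List.take_succ_cons, hvt]
      · -- tail chunks
        have hstep : ∀ i ∈ PySem.List.pyRange 0 (((x :: cs).length : Int) - vlim) vlim,
            PySem.List.slice (x :: cs) (some (i + vlim)) (some (i + vlim + vlim))
              = PySem.List.slice ((x :: cs).drop vlim.toNat) (some i) (some (i + vlim)) := by
          intro i hi
          obtain ⟨hi0, _, _⟩ := (PySem.List.mem_pyRange_iff_of_pos (by omega) i).mp hi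
          rw [PySem.List.slice_toNat _ (by omega) (by omega),
              PySem.List.slice_toNat _ (by omega) (by omega)]
          rw [List.drop_drop]
          congr 1
          · omega
          · congr 1
            omega
        have hmap : (PySem.List.pyRange 0 (((x :: cs).length : Int) - vlim) vlim).map
                ((fun i => PySem.List.slice (x :: cs) (some i) (some (i + vlim))) ∘ (· + vlim))
            = (PySem.List.pyRange 0 (((x :: cs).length : Int) - vlim) vlim).map
                (fun i => PySem.List.slice ((x :: cs).drop vlim.toNat) (some i) (some (i + vlim))) := by
          apply List.map_congr_left
          intro i hi
          simpa using hstep i hi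
        rw [hmap]
        have hdl : (x :: cs).drop vlim.toNat = cs.drop (vlim.toNat - 1) := by
          conv_lhs => rw [← hvt]
          rw [List.drop_succ_cons]
        rw [hdl]
        by_cases hc : vlim ≤ ((x :: cs).length : Int)
        · have hlen : (((cs.drop (vlim.toNat - 1)).length : Nat) : Int)
              = ((x :: cs).length : Int) - vlim := by
            rw [List.length_drop]
            simp only [List.length_cons] at hc ⊢
            omega
          rw [← hlen]
          exact ih
        · have h1 : ((x :: cs).length : Int) - vlim ≤ 0 := by omega
          have h2 : cs.drop (vlim.toNat - 1) = [] := by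
            apply List.drop_eq_nil_of_le
            simp only [List.length_cons] at hc
            omega
          rw [pyRange_pos_nil _ _ h1 (by omega), h2, pvChunksOf_nil]
          simp

theorem pvGetMkSelf {ν : Type} (d : List (String × ν)) (k : String) (v : ν)
    (hnd : (d.map Prod.fst).Nodup) (hm : (k, v) ∈ d) :
    (PySem.Dict.mk d).get? k = some v := by
  induction d with
  | nil => simp at hm
  | cons p rest ih =>
      obtain ⟨a, b⟩ := p
      rw [PySem.Dict.get?_mk_cons]
      simp only [List.map_cons, List.nodup_cons] at hnd
      rcases List.mem_cons.mp hm with heq | hmem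
      · injection heq with h1 h2
        subst h1; subst h2
        simp
      · have hak : (a == k) = false := by
          by_contra hcon
          have hak' : a = k := by
            cases h' : (a == k) with
            | false => exact absurd h' hcon
            | true => exact eq_of_beq h'
          subst hak'
          exact hnd.1 (List.mem_map_of_mem hmem)
        rw [hak]
        simp only [Bool.false_eq_true, if_false]
        exact ih hnd.2 hmem

theorem pvDictEq_refl (d : List (String × String)) (hnd : (d.map Prod.fst).Nodup) :
    pvDictEq d d = true := by
  unfold pvDictEq
  rw [Bool.and_self]
  rw [List.all_eq_true]
  intro kv hkv
  rw [pvGetMkSelf d kv.1 kv.2 hnd (by simpa using hkv)]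
  simp

theorem pvFeatEq_refl (f : List (String × List (String × String))) (h : pvNodupKeys f = true) :
    pvFeatEq f f = true := by
  unfold pvNodupKeys at h
  simp only [Bool.and_eq_true, List.all_eq_true, decide_eq_true_eq] at h
  obtain ⟨hnod, hall⟩ := h
  unfold pvFeatEq
  rw [Bool.and_self]
  rw [List.all_eq_true]
  intro kv hkv
  rw [pvGetMkSelf f kv.1 kv.2 hnod (by simpa using hkv)]
  exact pvDictEq_refl kv.2 (hall kv hkv)

theorem pvLoopA_eq_chunkC (vlim : Int) (last : List (String × List (String × String)))
    (mid suf : List (List (String × List (String × String))))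
    (hmid : ∀ x ∈ mid, pvFeatEq x last = false) (hlast : pvFeatEq last last = true)
    (final : List (List String)) (ext : List String) :
    pvLoopA vlim last (mid ++ last :: suf) final ext
      = pvChunkC vlim (pvCode last) final ext (mid.map pvCode) := by
  induction mid generalizing final ext with
  | nil => simp [pvLoopA, pvChunkC, hlast]
  | cons x rest ih =>
      have hx : pvFeatEq x last = false := hmid x (by simp)
      simp only [List.cons_append, pvLoopA, hx, List.map_cons, pvChunkC, Bool.false_eq_true,
        if_false]
      by_cases hlt : ((ext.length : Int) < vlim)
      · rw [if_pos hlt, if_pos hlt]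
        exact ih (fun y hy => hmid y (by simp [hy])) _ _
      · rw [if_neg hlt, if_neg hlt]
        exact ih (fun y hy => hmid y (by simp [hy])) _ _

theorem pvAltEq (features : List (List (String × List (String × String)))) (vlim : Int)
    (hne : features ≠ []) (hv : 1 ≤ vlim) :
    extract_ouvrages_alt features vlim
      = pvMergeLast (pvChunksOf (vlim.toNat - 1) (features.dropLast.map pvCode))
          (pvCode (features.getLast hne)) := by
  have hsplit : features.dropLast ++ [features.getLast hne] = features :=
    List.dropLast_concat_getLast hne
  have hcodes : features.map pvCode
      = features.dropLast.map pvCode ++ [pvCode (features.getLast hne)] := by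
    conv_lhs => rw [← hsplit]
    simp
  simp only [extract_ouvrages_alt, hcodes, PySem.List.pyGet?_neg_one_append_singleton,
    PySem.List.slice_to_neg_one, List.dropLast_concat, chunks_eq_chunksOf vlim hv]
  rfl

theorem pvFlatten_chunksOf (v : Nat) : ∀ cs : List String, (pvChunksOf v cs).flatten = cs := by
  intro cs
  induction cs using pvChunksOf.induct (v := v) with
  | case1 => simp [pvChunksOf_nil]
  | case2 x rest ih => rw [pvChunksOf_cons]; simp [ih]

theorem pvFlatten_mergeLast (chunks : List (List String)) (c : String) :
    (pvMergeLast chunks c).flatten = chunks.flatten ++ [c] := by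
  unfold pvMergeLast
  cases h : chunks.getLast? with
  | none => rw [List.getLast?_eq_none_iff.mp h]; simp
  | some lc =>
      have hne : chunks ≠ [] := by
        intro hcon; rw [hcon] at h; simp at h
      have hlc : chunks.getLast hne = lc := by
        have := List.getLast?_eq_some_getLast hne
        rw [h] at this; exact (Option.some_injective _ this.symm)
      conv_rhs => rw [← List.dropLast_concat_getLast hne, hlc]
      simp

theorem pvLoopA_flatten_bound (vlim : Int) (last e : List (String × List (String × String))) :
    ∀ (mid : List (List (String × List (String × String))))
      (final : List (List String)) (ext : List String),
    (∃ x ∈ mid, pvFeatEq x last = true) →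
    (pvLoopA vlim last (mid ++ [e]) final ext).flatten.length
      ≤ final.flatten.length + ext.length + mid.length := by
  intro mid
  induction mid with
  | nil =>
      rintro final ext ⟨x, hx, _⟩
      simp at hx
  | cons y rest ih =>
      rintro final ext ⟨x, hx, hfeq⟩
      by_cases hy : pvFeatEq y last = true
      · simp only [List.cons_append, pvLoopA, hy, if_pos]
        simp
        omega
      · have hx' : x ∈ rest := by
          rcases List.mem_cons.mp hx with rfl | hr
          · exact absurd hfeq hy
          · exact hr
        simp only [List.cons_append, pvLoopA, hy, Bool.false_eq_true, if_false]
        by_cases hlt : ((ext.length : Int) < vlim)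
        · rw [if_pos hlt]
          have := ih final (ext ++ [pvCode y]) ⟨x, hx', hfeq⟩
          simp at this ⊢
          omega
        · rw [if_neg hlt]
          have := ih (final ++ [ext]) [pvCode y] ⟨x, hx', hfeq⟩
          simp at this ⊢
          omega

-- ===== VERDICT (by name: the statement is the Claim_ definition above) =====
theorem extract_ouvrages_spec : Claim_unchanged_extract_ouvrages := by
  intro features vlim _ hPre hD
  obtain ⟨hne, hv, hkeys⟩ := hPre
  unfold D_extract_ouvrages at hD
  obtain ⟨l, hl⟩ : ∃ l, features.getLast hne = l := ⟨_, rfl⟩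
  have hsplit : features.dropLast ++ [l] = features := by
    rw [← hl]; exact List.dropLast_concat_getLast hne
  have hlastD : features.getLastD [] = l := by
    rw [List.getLastD_eq_getLast?, List.getLast?_eq_some_getLast hne, hl]
    rfl
  have hmid : ∀ x ∈ features.dropLast, pvFeatEq x l = false := by
    intro x hx
    cases h' : pvFeatEq x l with
    | false => rfl
    | true =>
        exact absurd (List.any_eq_true.mpr ⟨x, hx, by rwa [hlastD]⟩) hD
  have hlmem : l ∈ features := hl ▸ List.getLast_mem hne
  have hlast : pvFeatEq l l = true := pvFeatEq_refl l (hkeys l hlmem).2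
  have hget : PySem.List.pyGet? features (-1) = some l := by
    rw [PySem.List.pyGet?_neg_one, List.getLast?_eq_some_getLast hne, hl]
  -- A side
  have hA : extract_ouvrages features vlim
      = pvMergeLast (pvChunksOf (vlim.toNat - 1) (features.dropLast.map pvCode)) (pvCode l) := by
    simp only [extract_ouvrages, hget]
    conv_lhs => rw [← hsplit]
    rw [pvLoopA_eq_chunkC vlim l features.dropLast [] hmid hlast [] [],
        pvChunkC_eq_merge vlim hv _ _ []]
    simp
  -- B side
  have hB : extract_ouvrages_alt features vlim
      = pvMergeLast (pvChunksOf (vlim.toNat - 1) (features.dropLast.map pvCode)) (pvCode l) := by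
    rw [← hl]
    exact pvAltEq features vlim hne hv
  rw [hA, hB]

theorem extract_ouvrages_changed : Claim_changed_extract_ouvrages := by
  unfold Claim_changed_extract_ouvrages; decide

theorem extract_ouvrages_tight : Claim_exact_extract_ouvrages := by
  intro features vlim _ hPre hD heq
  obtain ⟨hne, hv, _⟩ := hPre
  unfold D_extract_ouvrages at hD
  obtain ⟨l, hl⟩ : ∃ l, features.getLast hne = l := ⟨_, rfl⟩
  have hlastD : features.getLastD [] = l := by
    rw [List.getLastD_eq_getLast?, List.getLast?_eq_some_getLast hne, hl]
    rfl
  rw [hlastD] at hD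
  simp only [List.any_eq_true] at hD
  obtain ⟨x, hx, hfeq⟩ := hD
  have hget : PySem.List.pyGet? features (-1) = some l := by
    rw [PySem.List.pyGet?_neg_one, List.getLast?_eq_some_getLast hne, hl]
  have hsplit : features.dropLast ++ [l] = features := by
    rw [← hl]; exact List.dropLast_concat_getLast hne
  have hA : (extract_ouvrages features vlim).flatten.length ≤ features.dropLast.length := by
    simp only [extract_ouvrages, hget]
    conv_lhs => rw [← hsplit]
    have := pvLoopA_flatten_bound vlim l l features.dropLast [] [] ⟨x, hx, hfeq⟩
    simpa using this
  have hB : (extract_ouvrages_alt features vlim).flatten.length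
      = features.dropLast.length + 1 := by
    rw [pvAltEq features vlim hne hv, pvFlatten_mergeLast, pvFlatten_chunksOf]
    simp
  rw [heq, hB] at hA
  omega
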